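-- pv_equiv track=rewrite | github.com/eaarayag/Plist_Agent | UserCode/src/plb_debug/libs/Finder.py | Search_main_global_PList
-- ===== SOURCE A (Python) =====
-- def Search_main_global_PList(content):  # P2
-- 	lines = content.splitlines()
-- 	filtered_content = []
-- 	inside_block = False
-- 	current_block = []
-- 	skip_block = False
--
-- 	for line in lines:  # Process each line to identify plist blocks
-- 		if line.startswith("GlobalPList"):
-- 			inside_block = True
-- 			current_block.append(line)
-- 		elif inside_block:
-- 			current_block.append(line)
-- 			if line.strip() == "}":
-- 				inside_block = False
-- 				if not skip_block:  # Check if the block should be omitted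
-- 					filtered_content.extend(current_block)
-- 				else:
-- 					filtered_content.extend(["\n"] * len(current_block))  # Replace block with blank lines
-- 				current_block = []
-- 				skip_block = False
-- 		else:
-- 			filtered_content.append("\n")  # Replace irrelevant content with blank line
--
-- 		if inside_block and line.strip().startswith("Pat d"):  # Ignore lines starting with "Pat d"
-- 			skip_block = True
--
-- 	return "\n".join(filtered_content)
-- ===== SOURCE B (Python) =====
-- def Search_main_global_PList(content):  # two-pass: parse segments, then render
--     lines = content.splitlines()
--     # Pass 1: segments: None for a plain line, (block_lines, skipped) for a closed block
--     segments = []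
--     i = 0
--     n = len(lines)
--     while i < n:
--         if lines[i].startswith("GlobalPList"):
--             j = i + 1
--             while j < n and lines[j].strip() != "}":
--                 j += 1
--             if j == n:
--                 break  # unclosed trailing block contributes nothing
--             segments.append((lines[i:j + 1],
--                              any(x.strip().startswith("Pat d") for x in lines[i + 1:j + 1])))
--             i = j + 1
--         else:
--             segments.append(None)
--             i += 1
--     # Pass 2: render
--     out = []
--     for seg in segments:
--         if seg is None:
--             out.append("\n")
--         else:
--             block, skipped = seg
--             out.extend(["\n"] * len(block) if skipped else block)
--     return "\n".join(out)
-- ===== Notes on version B (the rewrite author's own statement) =====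
-- stated objective: alternative
-- what changed: Replaces A's single-pass state machine (inside_block/current_block/skip_block flags) with a two-pass design: first parse the lines into segment records (plain line, or a complete block with its skipped flag found by scanning ahead to the closing brace), then render the segments; same line counts and placement.
import Mathlib
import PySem

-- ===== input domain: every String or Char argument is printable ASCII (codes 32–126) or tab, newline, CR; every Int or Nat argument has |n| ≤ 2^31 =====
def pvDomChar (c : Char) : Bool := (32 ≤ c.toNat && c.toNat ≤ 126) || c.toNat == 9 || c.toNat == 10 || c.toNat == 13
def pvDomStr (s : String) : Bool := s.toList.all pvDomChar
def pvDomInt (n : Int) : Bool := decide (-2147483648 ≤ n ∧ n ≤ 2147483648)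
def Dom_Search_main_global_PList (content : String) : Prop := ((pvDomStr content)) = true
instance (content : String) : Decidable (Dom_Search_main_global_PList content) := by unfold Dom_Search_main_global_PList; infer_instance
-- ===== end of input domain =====

-- B re-implements A as two passes (parse segments, then render) instead of A's one-pass state machine; same return value.

-- ===== PORT A =====
-- state: (filtered_content, inside_block, current_block, skip_block)
def pvStepA (st : List String × Bool × List String × Bool) (line : String) :
    List String × Bool × List String × Bool :=
  let filtered := st.1
  let inside := st.2.1
  let current := st.2.2.1
  let skip := st.2.2.2
  let st' :=
    if PySem.Str.startswith line "GlobalPList" then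
      (filtered, true, current ++ [line], skip)
    else if inside then
      let current := current ++ [line]
      if PySem.Str.strip line = "}" then
        (if !skip then filtered ++ current
         else filtered ++ List.replicate current.length "\n", false, ([] : List String), false)
      else (filtered, true, current, skip)
    else (filtered ++ ["\n"], inside, current, skip)
  if st'.2.1 && PySem.Str.startswith (PySem.Str.strip line) "Pat d" then
    (st'.1, st'.2.1, st'.2.2.1, true)
  else st'

def Search_main_global_PList (content : String) : String :=
  let lines := PySem.Str.splitlines content
  let st := lines.foldl pvStepA ([], false, [], false)
  PySem.Str.join "\n" st.1

-- ===== PORT B =====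
-- inner while loop: scan forward to the closing "}" line; returns (body incl. close, rest)
def pvTakeBlock : List String → Option (List String × List String)
  | [] => none
  | l :: ls =>
    if PySem.Str.strip l = "}" then some ([l], ls)
    else
      match pvTakeBlock ls with
      | none => none
      | some (b, r) => some (l :: b, r)

theorem pvTakeBlock_length {ls : List String} {b r : List String}
    (h : pvTakeBlock ls = some (b, r)) : r.length ≤ ls.length := by
  induction ls generalizing b r with
  | nil => simp [pvTakeBlock] at h
  | cons l ls ih =>
    simp only [pvTakeBlock] at h
    split at h
    · simp only [Option.some.injEq, Prod.mk.injEq] at h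
      obtain ⟨h1, h2⟩ := h
      subst h2
      exact Nat.le_succ _
    · cases htb : pvTakeBlock ls with
      | none => rw [htb] at h; simp at h
      | some p =>
        rw [htb] at h
        obtain ⟨b', r'⟩ := p
        simp only [Option.some.injEq, Prod.mk.injEq] at h
        obtain ⟨h1, h2⟩ := h
        subst h2
        have := ih htb
        simp only [List.length_cons]
        omega

-- pass 1: segments — none for a plain line, some (block lines, skipped) for a closed block
def pvSegParse : List String → List (Option (List String × Bool))
  | [] => []
  | l :: ls =>
    if PySem.Str.startswith l "GlobalPList" then
      match h : pvTakeBlock ls with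
      | none => []  -- unclosed trailing block contributes nothing
      | some (b, r) =>
        some (l :: b, b.any fun x => PySem.Str.startswith (PySem.Str.strip x) "Pat d")
          :: pvSegParse r
    else none :: pvSegParse ls
  termination_by ls => ls.length
  decreasing_by
    · exact Nat.lt_succ_of_le (pvTakeBlock_length h)
    · exact Nat.lt_succ_of_le (Nat.le_refl _)

-- pass 2: render one segment
def pvRenderSeg (seg : Option (List String × Bool)) : List String :=
  match seg with
  | none => ["\n"]
  | some (b, skipped) => if skipped then List.replicate b.length "\n" else b

def Search_main_global_PList_alt (content : String) : String :=
  let lines := PySem.Str.splitlines content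
  PySem.Str.join "\n" ((pvSegParse lines).flatMap pvRenderSeg)

-- ===== PRECONDITION & SPEC =====
def Spec_Search_main_global_PList (content : String) (out : String) : Prop := out = Search_main_global_PList_alt content
instance (content : String) (out : String) : Decidable (Spec_Search_main_global_PList content out) := by unfold Spec_Search_main_global_PList; infer_instance

-- ===== CLAIM (what is proved, stated in full; the proofs are below) =====
def Claim_equal_Search_main_global_PList : Prop := ∀ (content : String), Dom_Search_main_global_PList content → Spec_Search_main_global_PList content (Search_main_global_PList content)

-- ===== LEMMAS AND PROOFS =====

-- stripping a list headed by a non-space character keeps that head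
theorem pv_strip_cons_nonspace {c : Char} (hc : PySem.Chars.isspace c = false)
    (u : List Char) : ∃ t, PySem.Chars.strip (c :: u) = c :: t := by
  simp only [PySem.Chars.strip, PySem.Chars.lstrip, PySem.Chars.rstrip,
    List.dropWhile_cons, hc, Bool.false_eq_true, if_false, List.reverse_cons,
    List.dropWhile_append]
  by_cases he : (List.dropWhile PySem.Chars.isspace u.reverse).isEmpty = true
  · simp [he]
  · simp [he]

-- a line starting with "GlobalPList" strips to a string headed by 'G'
theorem pv_strip_head {l : String}
    (h : PySem.Str.startswith l "GlobalPList" = true) :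
    ∃ t, (PySem.Str.strip l).toList = 'G' :: t := by
  rw [PySem.Str.startswith_eq, PySem.Chars.startswith_iff] at h
  obtain ⟨u, hu⟩ := h
  have hG : ("GlobalPList".toList) = 'G' :: "lobalPList".toList := by decide
  have hl : l.toList = 'G' :: ("lobalPList".toList ++ u) := by
    rw [← hu, hG, List.cons_append]
  rw [PySem.Str.toList_strip, hl]
  exact pv_strip_cons_nonspace (by decide) _

theorem pv_gp_not_close {l : String}
    (h : PySem.Str.startswith l "GlobalPList" = true) :
    ¬ (PySem.Str.strip l = "}") := by
  intro hc
  obtain ⟨t, ht⟩ := pv_strip_head h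
  rw [hc] at ht
  simp at ht

theorem pv_gp_not_pat {l : String}
    (h : PySem.Str.startswith l "GlobalPList" = true) :
    PySem.Str.startswith (PySem.Str.strip l) "Pat d" = false := by
  obtain ⟨t, ht⟩ := pv_strip_head h
  rw [PySem.Str.startswith_eq]
  by_contra hb
  rw [Bool.not_eq_false, PySem.Chars.startswith_iff] at hb
  obtain ⟨u, hu⟩ := hb
  rw [ht] at hu
  have hh := congrArg (fun xs => xs.head?) hu
  simp at hh

theorem pv_close_not_pat {l : String}
    (h : PySem.Str.strip l = "}") :
    PySem.Str.startswith (PySem.Str.strip l) "Pat d" = false := by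
  rw [h]; decide

-- loop invariant while inside a block
theorem pv_inside (ls : List String) : ∀ (f cb : List String) (s : Bool),
    (List.foldl pvStepA (f, true, cb, s) ls).1 =
      match pvTakeBlock ls with
      | none => f
      | some (b, r) =>
        (List.foldl pvStepA
          (f ++ (if s || b.any (fun x => PySem.Str.startswith (PySem.Str.strip x) "Pat d")
                 then List.replicate (cb.length + b.length) "\n" else cb ++ b),
           false, [], false) r).1 := by
  induction ls with
  | nil => intro f cb s; simp [pvTakeBlock]
  | cons l ls ih =>
    intro f cb s
    rw [List.foldl_cons]
    by_cases hgp : PySem.Str.startswith l "GlobalPList" = true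
    · have hnc := pv_gp_not_close hgp
      have hnp := pv_gp_not_pat hgp
      have hstep : pvStepA (f, true, cb, s) l = (f, true, cb ++ [l], s) := by
        simp only [pvStepA, hgp, hnp]
        simp
      rw [hstep, ih]
      simp only [pvTakeBlock, if_neg hnc]
      cases htb : pvTakeBlock ls with
      | none => rfl
      | some p =>
        obtain ⟨b, r⟩ := p
        dsimp only
        simp only [List.any_cons, hnp, Bool.false_or, List.length_append,
          List.length_cons, List.length_nil, List.append_assoc, List.singleton_append,
          Nat.zero_add, Nat.add_comm, Nat.add_left_comm]
    · by_cases hc : PySem.Str.strip l = "}"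
      · have hnp := pv_close_not_pat hc
        have hstep : pvStepA (f, true, cb, s) l =
            ((if !s then f ++ (cb ++ [l]) else f ++ List.replicate (cb ++ [l]).length "\n"),
             false, [], false) := by
          simp only [pvStepA, hgp, hc]
          simp [List.length_append]
        rw [hstep]
        simp only [pvTakeBlock, if_pos hc]
        cases s <;>
          simp only [Bool.not_false, Bool.not_true, if_true, List.any_cons,
            List.any_nil, hnp, Bool.or_false, List.length_append, List.length_cons,
            List.length_nil]
        all_goals simp
      · have hstep : pvStepA (f, true, cb, s) l =
            (f, true, cb ++ [l],
             if PySem.Str.startswith (PySem.Str.strip l) "Pat d" then true else s) := by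
          by_cases hp : PySem.Str.startswith (PySem.Str.strip l) "Pat d" = true <;>
            · simp only [pvStepA, hgp, hc, hp]
              simp
        rw [hstep, ih]
        simp only [pvTakeBlock, if_neg hc]
        cases htb : pvTakeBlock ls with
        | none => rfl
        | some p =>
          obtain ⟨b, r⟩ := p
          dsimp only
          by_cases hp : PySem.Str.startswith (PySem.Str.strip l) "Pat d" = true <;>
            cases s <;>
              simp only [hp, List.any_cons, Bool.false_or, Bool.true_or, Bool.or_self,
                if_true, if_false, List.length_append, List.length_cons, List.length_nil,
                List.append_assoc, List.singleton_append, Nat.zero_add,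
                Nat.add_comm, Nat.add_left_comm, Bool.false_eq_true]

theorem pvSegParse_cons_none (l : String) (ls : List String)
    (hgp : PySem.Str.startswith l "GlobalPList" = true)
    (htb : pvTakeBlock ls = none) :
    pvSegParse (l :: ls) = [] := by
  simp only [pvSegParse, hgp, if_true]
  split
  · rfl
  · next heq => rw [htb] at heq; cases heq

theorem pvSegParse_cons_some (l : String) (ls b r : List String)
    (hgp : PySem.Str.startswith l "GlobalPList" = true)
    (htb : pvTakeBlock ls = some (b, r)) :
    pvSegParse (l :: ls) =
      some (l :: b, b.any fun x => PySem.Str.startswith (PySem.Str.strip x) "Pat d")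
        :: pvSegParse r := by
  simp only [pvSegParse, hgp, if_true]
  split
  · next heq => rw [htb] at heq; cases heq
  · next heq =>
    rw [htb] at heq
    simp only [Option.some.injEq, Prod.mk.injEq] at heq
    obtain ⟨h1, h2⟩ := heq
    subst h1; subst h2
    rfl

-- loop invariant outside a block
theorem pv_outside (ls : List String) (f : List String) :
    (List.foldl pvStepA (f, false, [], false) ls).1 =
      f ++ (pvSegParse ls).flatMap pvRenderSeg := by
  induction ls using pvSegParse.induct generalizing f with
  | case1 => simp [pvSegParse]
  | case2 l ls hgp htb =>
    have hnp := pv_gp_not_pat hgp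
    have hstep : pvStepA (f, false, [], false) l = (f, true, [l], false) := by
      simp only [pvStepA, hgp, hnp]
      simp
    rw [List.foldl_cons, hstep, pv_inside ls f [l] false]
    rw [htb, pvSegParse_cons_none l ls hgp htb]
    simp
  | case3 l ls hgp b r htb ih =>
    have hnp := pv_gp_not_pat hgp
    have hstep : pvStepA (f, false, [], false) l = (f, true, [l], false) := by
      simp only [pvStepA, hgp, hnp]
      simp
    rw [List.foldl_cons, hstep, pv_inside ls f [l] false]
    rw [htb]
    dsimp only
    rw [ih, pvSegParse_cons_some l ls b r hgp htb]
    simp only [List.flatMap_cons, pvRenderSeg]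
    cases hany : b.any fun x => PySem.Str.startswith (PySem.Str.strip x) "Pat d" <;>
      simp [List.append_assoc, Nat.add_comm]
  | case4 l ls hgp ih =>
    have hstep : pvStepA (f, false, [], false) l = (f ++ ["\n"], false, [], false) := by
      simp only [pvStepA]
      rw [if_neg hgp]
      simp
    rw [List.foldl_cons, hstep, ih]
    have hsp : pvSegParse (l :: ls) = none :: pvSegParse ls := by
      simp only [pvSegParse, if_neg hgp]
    rw [hsp]
    simp only [List.flatMap_cons, pvRenderSeg, List.singleton_append, List.append_assoc]

-- ===== VERDICT (by name: the statement is the Claim_ definition above) =====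
theorem Search_main_global_PList_spec : Claim_equal_Search_main_global_PList := by
  intro content _
  unfold Spec_Search_main_global_PList Search_main_global_PList Search_main_global_PList_alt
  simp only [pv_outside (PySem.Str.splitlines content) [], List.nil_append]
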